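-- pv_equiv track=rewrite | github.com/pengkev/GomokuAI | gomoku/gptgomoku.py | is_win
-- ===== SOURCE A (Python) =====
-- def is_bounded(board, y_end, x_end, length, d_y, d_x):
--     """Determines if a sequence is open, semi-open, or closed."""
--     y_start = y_end - (length - 1) * d_y
--     x_start = x_end - (length - 1) * d_x
--     board_size = len(board)
--
--     # Check boundaries for the start and end of the sequence
--     start_blocked = (
--         y_start - d_y < 0 or y_start - d_y >= board_size or
--         x_start - d_x < 0 or x_start - d_x >= board_size or
--         board[y_start - d_y][x_start - d_x] != " "
--     )
--
--     end_blocked = (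
--         y_end + d_y < 0 or y_end + d_y >= board_size or
--         x_end + d_x < 0 or x_end + d_x >= board_size or
--         board[y_end + d_y][x_end + d_x] != " "
--     )
--
--     if not start_blocked and not end_blocked:
--         return "OPEN"
--     elif start_blocked ^ end_blocked:
--         return "SEMIOPEN"
--     else:
--         return "CLOSED"
--
-- def detect_row(board, col, y_start, x_start, length, d_y, d_x):
--     """Detects open and semi-open rows of a given length starting from a position."""
--     open_seq_count = 0
--     semi_open_seq_count = 0
--     board_size = len(board)
--
--     y, x = y_start, x_start
--     while 0 <= y < board_size and 0 <= x < board_size: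
--         # Check if there is a sequence of `length` with color `col`
--         sequence_found = True
--         for i in range(length):
--             if not (0 <= y + i * d_y < board_size and 0 <= x + i * d_x < board_size):
--                 sequence_found = False
--                 break
--             if board[y + i * d_y][x + i * d_x] != col:
--                 sequence_found = False
--                 break
--
--         if sequence_found:
--             y_end = y + (length - 1) * d_y
--             x_end = x + (length - 1) * d_x
--             bound_status = is_bounded(board, y_end, x_end, length, d_y, d_x)
--             if bound_status == "OPEN":
--                 open_seq_count += 1
--             elif bound_status == "SEMIOPEN":
--                 semi_open_seq_count += 1
--             y += length * d_y
--             x += length * d_x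
--         else:
--             y += d_y
--             x += d_x
--
--     return open_seq_count, semi_open_seq_count
--
-- def is_win(board):
--     """Checks if there is a winning sequence on the board."""
--     for col in ['b', 'w']:
--         for i in range(len(board)):
--             for j in range(len(board)):
--                 # Check if there's a five-in-a-row in any direction
--                 if detect_row(board, col, i, j, 5, 0, 1)[0] > 0:
--                     return f"{col.upper()} won"
--                 if detect_row(board, col, i, j, 5, 1, 0)[0] > 0:
--                     return f"{col.upper()} won"
--                 if detect_row(board, col, i, j, 5, 1, 1)[0] > 0:
--                     return f"{col.upper()} won"
--                 if detect_row(board, col, i, j, 5, 1, -1)[0] > 0: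
--                     return f"{col.upper()} won"
--
--     # Check if the board is completely filled
--     if all(board[i][j] != " " for i in range(len(board)) for j in range(len(board[0]))):
--         return "Draw"
--
--     return "Continue playing"
-- ===== SOURCE B (Python) =====
-- def is_win(board):
--     """Checks if there is a winning sequence on the board."""
--     n = len(board)
--     dirs = ((0, 1), (1, 0), (1, 1), (1, -1))
--     for col in ('b', 'w'):
--         for y in range(n):
--             for x in range(n):
--                 for d_y, d_x in dirs:
--                     py, px = y - d_y, x - d_x
--                     ey, ex = y + 5 * d_y, x + 5 * d_x
--                     if not (0 <= py < n and 0 <= px < n and 0 <= ey < n and 0 <= ex < n):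
--                         continue
--                     if (board[py][px] == " " and board[ey][ex] == " "
--                             and all(board[y + k * d_y][x + k * d_x] == col for k in range(5))):
--                         return col.upper() + " won"
--     if any(" " in row for row in board):
--         return "Continue playing"
--     return "Draw"
-- ===== Notes on version B (the rewrite author's own statement) =====
-- stated objective: faster
-- what changed: Instead of calling detect_row (which re-scans a whole ray and re-counts open/semi-open runs) for every color, start cell and direction, B makes a single pass over the cells testing, for each of the 4 directions, whether the 5-window starting there is all one color with both flanking cells on-board and blank (exactly A's OPEN condition), then checks for a blank cell for the draw/continue verdict.
-- outside the precondition, e.g. on is_win([['a', 'b'], ['x', 'y', ' ']]): A returns 'Draw', B returns 'Continue playing'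
import Mathlib
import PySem

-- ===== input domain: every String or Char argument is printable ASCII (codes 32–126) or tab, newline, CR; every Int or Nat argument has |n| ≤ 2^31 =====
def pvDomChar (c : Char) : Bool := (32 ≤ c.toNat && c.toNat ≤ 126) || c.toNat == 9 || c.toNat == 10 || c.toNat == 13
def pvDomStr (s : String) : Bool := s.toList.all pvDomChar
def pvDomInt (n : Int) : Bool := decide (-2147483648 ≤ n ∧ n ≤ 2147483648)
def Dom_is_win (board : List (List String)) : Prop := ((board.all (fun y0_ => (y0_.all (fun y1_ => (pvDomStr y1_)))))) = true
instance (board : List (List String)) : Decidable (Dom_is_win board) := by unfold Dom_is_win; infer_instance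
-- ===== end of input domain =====

-- B replaces A's per-start-cell detect_row ray scans by one pass that tests each cell's four
-- 5-windows for A's OPEN condition (measurably faster; asymptotic change).

-- ===== PORT A =====
-- board[y][x]; every access in either port is guarded by 0 ≤ y,x < len(board), where Python never raises
def pvCell (board : List (List String)) (y x : Int) : String :=
  ((PySem.List.pyGet? ((PySem.List.pyGet? board y).getD []) x)).getD ""

def pvIsBounded (board : List (List String)) (y_end x_end length d_y d_x : Int) : String :=
  let y_start := y_end - (length - 1) * d_y
  let x_start := x_end - (length - 1) * d_x
  let board_size : Int := board.length
  let start_blocked : Bool :=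
    decide (y_start - d_y < 0) || decide (board_size ≤ y_start - d_y) ||
    decide (x_start - d_x < 0) || decide (board_size ≤ x_start - d_x) ||
    decide (pvCell board (y_start - d_y) (x_start - d_x) ≠ " ")
  let end_blocked : Bool :=
    decide (y_end + d_y < 0) || decide (board_size ≤ y_end + d_y) ||
    decide (x_end + d_x < 0) || decide (board_size ≤ x_end + d_x) ||
    decide (pvCell board (y_end + d_y) (x_end + d_x) ≠ " ")
  if !start_blocked && !end_blocked then "OPEN"
  else if start_blocked ^^ end_blocked then "SEMIOPEN"
  else "CLOSED"

-- "for i in range(length)" of detect_row with its two break conditions; rem = remaining iterations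
def pvSeqFound (board : List (List String)) (col : String) (y x d_y d_x : Int) : Nat → Int → Bool
  | 0, _ => true
  | rem + 1, i =>
    if 0 ≤ y + i * d_y ∧ y + i * d_y < (board.length : Int) ∧
       0 ≤ x + i * d_x ∧ x + i * d_x < (board.length : Int) then
      if pvCell board (y + i * d_y) (x + i * d_x) = col then
        pvSeqFound board col y x d_y d_x rem (i + 1)
      else false
    else false

-- the while loop of detect_row; fuel = len(board) bounds the iterations actually executed
-- (each executed iteration strictly increases y, or x for the direction (0,1))
def pvDetectLoop (board : List (List String)) (col : String) (length d_y d_x : Int) :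
    Nat → Int → Int → Int → Int → Int × Int
  | 0, _, _, openC, semiC => (openC, semiC)
  | fuel + 1, y, x, openC, semiC =>
    if 0 ≤ y ∧ y < (board.length : Int) ∧ 0 ≤ x ∧ x < (board.length : Int) then
      if pvSeqFound board col y x d_y d_x length.toNat 0 then
        let y_end := y + (length - 1) * d_y
        let x_end := x + (length - 1) * d_x
        let st := pvIsBounded board y_end x_end length d_y d_x
        pvDetectLoop board col length d_y d_x fuel (y + length * d_y) (x + length * d_x)
          (if st = "OPEN" then openC + 1 else openC)
          (if st = "SEMIOPEN" then semiC + 1 else semiC)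
      else
        pvDetectLoop board col length d_y d_x fuel (y + d_y) (x + d_x) openC semiC
    else (openC, semiC)

def pvDetectRow (board : List (List String)) (col : String) (y_start x_start length d_y d_x : Int) :
    Int × Int :=
  pvDetectLoop board col length d_y d_x board.length y_start x_start 0 0

def is_win (board : List (List String)) : String :=
  (((["b", "w"] : List String).findSome? (fun col =>
    (List.range board.length).findSome? (fun i : Nat =>
      (List.range board.length).findSome? (fun j : Nat =>
        if (pvDetectRow board col (i : Int) (j : Int) 5 0 1).1 > 0 then some (PySem.Str.upper col ++ " won")
        else if (pvDetectRow board col (i : Int) (j : Int) 5 1 0).1 > 0 then some (PySem.Str.upper col ++ " won")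
        else if (pvDetectRow board col (i : Int) (j : Int) 5 1 1).1 > 0 then some (PySem.Str.upper col ++ " won")
        else if (pvDetectRow board col (i : Int) (j : Int) 5 1 (-1)).1 > 0 then some (PySem.Str.upper col ++ " won")
        else none))))).getD
  (if (List.range board.length).all (fun i : Nat =>
      (List.range (board.headD []).length).all (fun j : Nat => decide (pvCell board (i : Int) (j : Int) ≠ " "))) then
    "Draw"
  else "Continue playing")

-- ===== PORT B =====
def pvOpenAt (board : List (List String)) (col : String) (y x d_y d_x : Int) : Bool :=
  let n : Int := board.length
  let py := y - d_y
  let px := x - d_x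
  let ey := y + 5 * d_y
  let ex := x + 5 * d_x
  if 0 ≤ py ∧ py < n ∧ 0 ≤ px ∧ px < n ∧ 0 ≤ ey ∧ ey < n ∧ 0 ≤ ex ∧ ex < n then
    decide (pvCell board py px = " ") && decide (pvCell board ey ex = " ") &&
      (List.range 5).all (fun k => decide (pvCell board (y + k * d_y) (x + k * d_x) = col))
  else false

def is_win_alt (board : List (List String)) : String :=
  (((["b", "w"] : List String).findSome? (fun col =>
    (List.range board.length).findSome? (fun y : Nat =>
      (List.range board.length).findSome? (fun x : Nat =>
        if ([(0, 1), (1, 0), (1, 1), (1, -1)] : List (Int × Int)).any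
            (fun d => pvOpenAt board col (y : Int) (x : Int) d.1 d.2) then
          some (PySem.Str.upper col ++ " won")
        else none))))).getD
  (if board.any (fun row => row.contains " ") then "Continue playing" else "Draw")

-- ===== PRECONDITION & SPEC =====
-- Pre_ excludes ragged boards: when some row is shorter than the board height A raises IndexError,
-- and on other unequal-length rows A's draw scan truncates every row to the first row's length,
-- an artefact of its implementation (see the cite in claim.json).
def Pre_is_win (board : List (List String)) : Prop :=
  (∀ r ∈ board, r.length = (board.headD []).length) ∧ (∀ r ∈ board, board.length ≤ r.length)
instance (board : List (List String)) : Decidable (Pre_is_win board) := by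
  unfold Pre_is_win; infer_instance

def pvWitness_is_win : List (List String) := [[" "]]

def Spec_is_win (board : List (List String)) (out : String) : Prop := out = is_win_alt board
instance (board : List (List String)) (out : String) : Decidable (Spec_is_win board out) := by
  unfold Spec_is_win; infer_instance

-- ===== CLAIM (what is proved, stated in full; the proofs are below) =====
def Claim_equal_is_win : Prop := ∀ (board : List (List String)), Dom_is_win board →
  Pre_is_win board → Spec_is_win board (is_win board)

-- ===== LEMMAS AND PROOFS =====

-- proof-side vocabulary
abbrev CellOK (board : List (List String)) (col : String) (y x : Int) : Prop :=
  (0 ≤ y ∧ y < (board.length : Int) ∧ 0 ≤ x ∧ x < (board.length : Int)) ∧ pvCell board y x = col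

abbrev OpenWin (board : List (List String)) (col : String) (y x d_y d_x : Int) : Prop :=
  CellOK board " " (y - d_y) (x - d_x) ∧ CellOK board " " (y + 5 * d_y) (x + 5 * d_x) ∧
  ∀ k : Nat, k < 5 → CellOK board col (y + k * d_y) (x + k * d_x)

abbrev Dir4 (d_y d_x : Int) : Prop :=
  (d_y = 0 ∧ d_x = 1) ∨ (d_y = 1 ∧ d_x = 0) ∨ (d_y = 1 ∧ d_x = 1) ∨ (d_y = 1 ∧ d_x = -1)

abbrev HasOpen (board : List (List String)) (col : String) : Prop :=
  ∃ d_y d_x, Dir4 d_y d_x ∧ ∃ y x : Int, OpenWin board col y x d_y d_x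

lemma pvCell_eq (board : List (List String)) (i j : Nat) (hi : i < board.length)
    (hj : j < board[i].length) : pvCell board i j = board[i][j] := by
  unfold pvCell
  simp only [PySem.List.pyGet?_natCast]
  rw [List.getElem?_eq_getElem hi, Option.getD_some, List.getElem?_eq_getElem hj, Option.getD_some]

lemma findSome?_ite_const {α β : Type} (l : List α) (P : α → Prop) [DecidablePred P] (c : β) :
    (l.findSome? fun a => if P a then some c else none) =
      if ∃ a ∈ l, P a then some c else none := by
  induction l with
  | nil => simp
  | cons a l ih =>
    simp only [List.findSome?_cons]
    by_cases h : P a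
    · simp [h]
    · simp only [if_neg h, ih]
      by_cases h2 : ∃ b ∈ l, P b
      · rw [if_pos h2, if_pos]
        obtain ⟨b, hb, hPb⟩ := h2
        exact ⟨b, List.mem_cons_of_mem a hb, hPb⟩
      · rw [if_neg h2, if_neg]
        rintro ⟨b, hb, hPb⟩
        rcases List.mem_cons.1 hb with rfl | hb'
        · exact h hPb
        · exact h2 ⟨b, hb', hPb⟩

lemma pvSeqFound_iff (board : List (List String)) (col : String) (y x d_y d_x : Int) :
    ∀ (rem : Nat) (i : Int), pvSeqFound board col y x d_y d_x rem i = true ↔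
      ∀ k : Nat, k < rem → CellOK board col (y + (i + k) * d_y) (x + (i + k) * d_x) := by
  intro rem
  induction rem with
  | zero => intro i; simp [pvSeqFound]
  | succ rem ih =>
    intro i
    simp only [pvSeqFound]
    by_cases hr : 0 ≤ y + i * d_y ∧ y + i * d_y < (board.length : Int) ∧
        0 ≤ x + i * d_x ∧ x + i * d_x < (board.length : Int)
    · by_cases hc : pvCell board (y + i * d_y) (x + i * d_x) = col
      · rw [if_pos hr, if_pos hc, ih]
        constructor
        · intro h k hk
          match k with
          | 0 => simpa using ⟨hr, hc⟩
          | (k + 1) =>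
            have hh := h k (by omega)
            have e1 : (i + 1) + (k : Int) = i + ((k + 1 : Nat) : Int) := by push_cast; ring
            rwa [e1] at hh
        · intro h k hk
          have hh := h (k + 1) (by omega)
          have e1 : i + ((k + 1 : Nat) : Int) = (i + 1) + (k : Int) := by push_cast; ring
          rwa [e1] at hh
      · rw [if_pos hr, if_neg hc]
        simp only [Bool.false_eq_true, false_iff]
        intro h
        exact hc (by simpa using (h 0 (by omega)).2)
    · rw [if_neg hr]
      simp only [Bool.false_eq_true, false_iff]
      intro h
      exact hr (by simpa using (h 0 (by omega)).1)

lemma pvIsBounded_open_iff (board : List (List String)) (y x d_y d_x : Int) :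
    pvIsBounded board (y + (5 - 1) * d_y) (x + (5 - 1) * d_x) 5 d_y d_x = "OPEN" ↔
      (CellOK board " " (y - d_y) (x - d_x) ∧ CellOK board " " (y + 5 * d_y) (x + 5 * d_x)) := by
  have cy : y + (5 - 1) * d_y - ((5 : Int) - 1) * d_y - d_y = y - d_y := by ring
  have cx : x + (5 - 1) * d_x - ((5 : Int) - 1) * d_x - d_x = x - d_x := by ring
  have ey : y + (5 - 1) * d_y + d_y = y + 5 * d_y := by ring
  have ex : x + (5 - 1) * d_x + d_x = x + 5 * d_x := by ring
  simp only [pvIsBounded, cy, cx, ey, ex]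
  have hsb : (decide (y - d_y < 0) || decide ((board.length : Int) ≤ y - d_y) ||
      decide (x - d_x < 0) || decide ((board.length : Int) ≤ x - d_x) ||
      decide (pvCell board (y - d_y) (x - d_x) ≠ " ")) = false ↔
      CellOK board " " (y - d_y) (x - d_x) := by
    simp only [Bool.or_eq_false_iff, decide_eq_false_iff_not, not_lt, not_le, not_not]
    constructor
    · rintro ⟨⟨⟨⟨h1, h2⟩, h3⟩, h4⟩, h5⟩; exact ⟨⟨h1, h2, h3, h4⟩, h5⟩
    · rintro ⟨⟨h1, h2, h3, h4⟩, h5⟩; exact ⟨⟨⟨⟨h1, h2⟩, h3⟩, h4⟩, h5⟩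
  have heb : (decide (y + 5 * d_y < 0) || decide ((board.length : Int) ≤ y + 5 * d_y) ||
      decide (x + 5 * d_x < 0) || decide ((board.length : Int) ≤ x + 5 * d_x) ||
      decide (pvCell board (y + 5 * d_y) (x + 5 * d_x) ≠ " ")) = false ↔
      CellOK board " " (y + 5 * d_y) (x + 5 * d_x) := by
    simp only [Bool.or_eq_false_iff, decide_eq_false_iff_not, not_lt, not_le, not_not]
    constructor
    · rintro ⟨⟨⟨⟨h1, h2⟩, h3⟩, h4⟩, h5⟩; exact ⟨⟨h1, h2, h3, h4⟩, h5⟩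
    · rintro ⟨⟨h1, h2, h3, h4⟩, h5⟩; exact ⟨⟨⟨⟨h1, h2⟩, h3⟩, h4⟩, h5⟩
  cases hsv : (decide (y - d_y < 0) || decide ((board.length : Int) ≤ y - d_y) ||
      decide (x - d_x < 0) || decide ((board.length : Int) ≤ x - d_x) ||
      decide (pvCell board (y - d_y) (x - d_x) ≠ " ")) <;>
  cases hev : (decide (y + 5 * d_y < 0) || decide ((board.length : Int) ≤ y + 5 * d_y) ||
      decide (x + 5 * d_x < 0) || decide ((board.length : Int) ≤ x + 5 * d_x) ||
      decide (pvCell board (y + 5 * d_y) (x + 5 * d_x) ≠ " "))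
  · exact iff_of_true (by simp) ⟨hsb.1 hsv, heb.1 hev⟩
  · refine iff_of_false (by simp) ?_
    rintro ⟨c1, c2⟩
    exact Bool.false_ne_true ((heb.2 c2).symm.trans hev)
  · refine iff_of_false (by simp) ?_
    rintro ⟨c1, c2⟩
    exact Bool.false_ne_true ((hsb.2 c1).symm.trans hsv)
  · refine iff_of_false (by simp) ?_
    rintro ⟨c1, c2⟩
    exact Bool.false_ne_true ((hsb.2 c1).symm.trans hsv)

lemma noWin_of_out (board : List (List String)) (col : String) (d_y d_x : Int)
    (hd : Dir4 d_y d_x) (y x : Int) (hy : d_y = 1 → 0 ≤ y) (hx : d_x = 1 → 0 ≤ x)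
    (hx' : d_x = -1 → x < (board.length : Int))
    (hout : ¬(0 ≤ y ∧ y < (board.length : Int) ∧ 0 ≤ x ∧ x < (board.length : Int))) :
    ¬∃ t : Nat, OpenWin board col (y + t * d_y) (x + t * d_x) d_y d_x := by
  rintro ⟨t, hw⟩
  have h0 := (hw.2.2 0 (by omega)).1
  have ht : (0 : Int) ≤ (t : Int) := Int.natCast_nonneg t
  simp only [Nat.cast_zero, zero_mul, add_zero] at h0
  rcases hd with ⟨rfl, rfl⟩ | ⟨rfl, rfl⟩ | ⟨rfl, rfl⟩ | ⟨rfl, rfl⟩ <;>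
    simp only [mul_zero, mul_one, mul_neg_one, add_zero] at h0 <;> omega

lemma pvDetectLoop_fst_mono (board : List (List String)) (col : String) (length d_y d_x : Int) :
    ∀ (fuel : Nat) (y x oc sc : Int),
      oc ≤ (pvDetectLoop board col length d_y d_x fuel y x oc sc).1 := by
  intro fuel
  induction fuel with
  | zero => intro y x oc sc; simp [pvDetectLoop]
  | succ fuel ih =>
    intro y x oc sc
    simp only [pvDetectLoop]
    by_cases hin : 0 ≤ y ∧ y < (board.length : Int) ∧ 0 ≤ x ∧ x < (board.length : Int)
    · rw [if_pos hin]
      by_cases hseq : pvSeqFound board col y x d_y d_x length.toNat 0 = true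
      · rw [if_pos hseq]
        refine le_trans ?_ (ih _ _ _ _)
        split_ifs <;> omega
      · rw [if_neg hseq]; exact ih _ _ _ _
    · rw [if_neg hin]

lemma pvDetectLoop_pos_iff (board : List (List String)) (col : String) (hcol : col ≠ " ")
    (d_y d_x : Int) (hd : Dir4 d_y d_x) :
    ∀ (fuel : Nat) (y x oc sc : Int),
      (d_y = 1 → 0 ≤ y) → (d_x = 1 → 0 ≤ x) → (d_x = -1 → x < (board.length : Int)) →
      ((board.length : Int) ≤ (if d_y = 1 then y else x) + fuel) →
      (oc < (pvDetectLoop board col 5 d_y d_x fuel y x oc sc).1 ↔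
        ∃ t : Nat, OpenWin board col (y + t * d_y) (x + t * d_x) d_y d_x) := by
  intro fuel
  induction fuel with
  | zero =>
    intro y x oc sc hy hx hx' hfuel
    simp only [pvDetectLoop]
    refine iff_of_false (lt_irrefl oc) (noWin_of_out board col d_y d_x hd y x hy hx hx' ?_)
    simp only [Nat.cast_zero, add_zero] at hfuel
    rcases hd with ⟨h1, h2⟩ | ⟨h1, h2⟩ | ⟨h1, h2⟩ | ⟨h1, h2⟩ <;> subst h1 <;> subst h2
    · rw [if_neg (by norm_num)] at hfuel; omega
    · rw [if_pos rfl] at hfuel; omega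
    · rw [if_pos rfl] at hfuel; omega
    · rw [if_pos rfl] at hfuel; omega
  | succ fuel ih =>
    intro y x oc sc hy hx hx' hfuel
    simp only [pvDetectLoop, show Int.toNat 5 = 5 from rfl]
    by_cases hin : 0 ≤ y ∧ y < (board.length : Int) ∧ 0 ≤ x ∧ x < (board.length : Int)
    · rw [if_pos hin]
      by_cases hseq : pvSeqFound board col y x d_y d_x 5 0 = true
      · rw [if_pos hseq]
        have hseq' := (pvSeqFound_iff board col y x d_y d_x 5 0).1 hseq
        have inv1 : d_y = 1 → 0 ≤ y + 5 * d_y := by intro h; rw [h]; omega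
        have inv2 : d_x = 1 → 0 ≤ x + 5 * d_x := by intro h; rw [h]; omega
        have inv3 : d_x = -1 → x + 5 * d_x < (board.length : Int) := by intro h; rw [h]; omega
        have invf : (board.length : Int) ≤
            (if d_y = 1 then y + 5 * d_y else x + 5 * d_x) + (fuel : Int) := by
          by_cases hdy : d_y = 1
          · rw [if_pos hdy] at ⊢; rw [if_pos hdy] at hfuel; rw [hdy]
            push_cast at hfuel ⊢; omega
          · have hdx : d_y = 0 ∧ d_x = 1 := by
              rcases hd with h | h | h | h
              · exact h
              all_goals exact absurd h.1 hdy
            rw [if_neg hdy] at ⊢; rw [if_neg hdy] at hfuel; rw [hdx.2]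
            push_cast at hfuel ⊢; omega
        by_cases hopen :
            pvIsBounded board (y + (5 - 1) * d_y) (x + (5 - 1) * d_x) 5 d_y d_x = "OPEN"
        · rw [if_pos hopen]
          refine iff_of_true
            (lt_of_lt_of_le (by omega) (pvDetectLoop_fst_mono board col 5 d_y d_x fuel _ _ _ _))
            ⟨0, ?_⟩
          have hb := (pvIsBounded_open_iff board y x d_y d_x).1 hopen
          simp only [Nat.cast_zero, zero_mul, add_zero]
          refine ⟨hb.1, hb.2, fun k hk => ?_⟩
          have hh := hseq' k hk
          simpa using hh
        · rw [if_neg hopen]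
          rw [ih (y + 5 * d_y) (x + 5 * d_x) oc _ inv1 inv2 inv3 invf]
          constructor
          · rintro ⟨t', hw⟩
            refine ⟨t' + 5, ?_⟩
            have e1 : y + ((t' + 5 : Nat) : Int) * d_y = (y + 5 * d_y) + (t' : Int) * d_y := by
              push_cast; ring
            have e2 : x + ((t' + 5 : Nat) : Int) * d_x = (x + 5 * d_x) + (t' : Int) * d_x := by
              push_cast; ring
            rw [e1, e2]; exact hw
          · rintro ⟨t, hw⟩
            have ht5 : 5 ≤ t := by
              by_contra hlt
              rcases Nat.eq_zero_or_pos t with rfl | hpos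
              · apply hopen
                refine (pvIsBounded_open_iff board y x d_y d_x).2 ?_
                simp only [Nat.cast_zero, zero_mul, add_zero] at hw
                exact ⟨hw.1, hw.2.1⟩
              · have c1 := hw.1.2
                have c2 := (hseq' (t - 1) (by omega)).2
                have e1 : y + (t : Int) * d_y - d_y = y + (0 + ((t - 1 : Nat) : Int)) * d_y := by
                  have h1 : ((t - 1 : Nat) : Int) = (t : Int) - 1 := by omega
                  rw [h1]; ring
                have e2 : x + (t : Int) * d_x - d_x = x + (0 + ((t - 1 : Nat) : Int)) * d_x := by
                  have h1 : ((t - 1 : Nat) : Int) = (t : Int) - 1 := by omega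
                  rw [h1]; ring
                rw [e1, e2, c2] at c1
                exact hcol c1
            refine ⟨t - 5, ?_⟩
            have e1 : (y + 5 * d_y) + ((t - 5 : Nat) : Int) * d_y = y + (t : Int) * d_y := by
              have h1 : ((t - 5 : Nat) : Int) = (t : Int) - 5 := by omega
              rw [h1]; ring
            have e2 : (x + 5 * d_x) + ((t - 5 : Nat) : Int) * d_x = x + (t : Int) * d_x := by
              have h1 : ((t - 5 : Nat) : Int) = (t : Int) - 5 := by omega
              rw [h1]; ring
            rw [e1, e2]; exact hw
      · rw [if_neg hseq]
        have inv1 : d_y = 1 → 0 ≤ y + d_y := by intro h; rw [h]; omega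
        have inv2 : d_x = 1 → 0 ≤ x + d_x := by intro h; rw [h]; omega
        have inv3 : d_x = -1 → x + d_x < (board.length : Int) := by intro h; rw [h]; omega
        have invf : (board.length : Int) ≤
            (if d_y = 1 then y + d_y else x + d_x) + (fuel : Int) := by
          by_cases hdy : d_y = 1
          · rw [if_pos hdy] at ⊢; rw [if_pos hdy] at hfuel; rw [hdy]
            push_cast at hfuel ⊢; omega
          · have hdx : d_y = 0 ∧ d_x = 1 := by
              rcases hd with h | h | h | h
              · exact h
              all_goals exact absurd h.1 hdy
            rw [if_neg hdy] at ⊢; rw [if_neg hdy] at hfuel; rw [hdx.2]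
            push_cast at hfuel ⊢; omega
        rw [ih (y + d_y) (x + d_x) oc sc inv1 inv2 inv3 invf]
        constructor
        · rintro ⟨t', hw⟩
          refine ⟨t' + 1, ?_⟩
          have e1 : y + ((t' + 1 : Nat) : Int) * d_y = (y + d_y) + (t' : Int) * d_y := by
            push_cast; ring
          have e2 : x + ((t' + 1 : Nat) : Int) * d_x = (x + d_x) + (t' : Int) * d_x := by
            push_cast; ring
          rw [e1, e2]; exact hw
        · rintro ⟨t, hw⟩
          have ht1 : 1 ≤ t := by
            rcases Nat.eq_zero_or_pos t with rfl | hpos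
            · exfalso
              apply hseq
              refine (pvSeqFound_iff board col y x d_y d_x 5 0).2 ?_
              intro k hk
              have hc := hw.2.2 k hk
              have e1 : y + ((0 : Nat) : Int) * d_y + (k : Int) * d_y =
                  y + (0 + (k : Int)) * d_y := by push_cast; ring
              have e2 : x + ((0 : Nat) : Int) * d_x + (k : Int) * d_x =
                  x + (0 + (k : Int)) * d_x := by push_cast; ring
              rwa [e1, e2] at hc
            · exact hpos
          refine ⟨t - 1, ?_⟩
          have e1 : (y + d_y) + ((t - 1 : Nat) : Int) * d_y = y + (t : Int) * d_y := by
            have h1 : ((t - 1 : Nat) : Int) = (t : Int) - 1 := by omega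
            rw [h1]; ring
          have e2 : (x + d_x) + ((t - 1 : Nat) : Int) * d_x = x + (t : Int) * d_x := by
            have h1 : ((t - 1 : Nat) : Int) = (t : Int) - 1 := by omega
            rw [h1]; ring
          rw [e1, e2]; exact hw
    · rw [if_neg hin]
      exact iff_of_false (lt_irrefl oc) (noWin_of_out board col d_y d_x hd y x hy hx hx' hin)

lemma pvDetectRow_pos_iff (board : List (List String)) (col : String) (hcol : col ≠ " ")
    (d_y d_x : Int) (hd : Dir4 d_y d_x) (i j : Nat) (hj : j < board.length) :
    ((pvDetectRow board col (i : Int) (j : Int) 5 d_y d_x).1 > 0 ↔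
      ∃ t : Nat, OpenWin board col ((i : Int) + t * d_y) ((j : Int) + t * d_x) d_y d_x) := by
  unfold pvDetectRow
  refine pvDetectLoop_pos_iff board col hcol d_y d_x hd board.length i j 0 0
    (fun _ => Int.natCast_nonneg i) (fun _ => Int.natCast_nonneg j)
    (fun _ => by exact_mod_cast hj) ?_
  by_cases hdy : d_y = 1
  · rw [if_pos hdy]
    have := Int.natCast_nonneg i; omega
  · rw [if_neg hdy]
    have := Int.natCast_nonneg j; omega

lemma pvOpenAt_iff (board : List (List String)) (col : String) (d_y d_x : Int)
    (hd : Dir4 d_y d_x) (y x : Int) :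
    pvOpenAt board col y x d_y d_x = true ↔ OpenWin board col y x d_y d_x := by
  simp only [pvOpenAt]
  by_cases hb : 0 ≤ y - d_y ∧ y - d_y < (board.length : Int) ∧ 0 ≤ x - d_x ∧
      x - d_x < (board.length : Int) ∧ 0 ≤ y + 5 * d_y ∧ y + 5 * d_y < (board.length : Int) ∧
      0 ≤ x + 5 * d_x ∧ x + 5 * d_x < (board.length : Int)
  · rw [if_pos hb]
    simp only [Bool.and_eq_true, decide_eq_true_eq, List.all_eq_true, List.mem_range]
    obtain ⟨b1, b2, b3, b4, b5, b6, b7, b8⟩ := hb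
    constructor
    · rintro ⟨⟨hp, he⟩, hall⟩
      refine ⟨⟨⟨b1, b2, b3, b4⟩, hp⟩, ⟨⟨b5, b6, b7, b8⟩, he⟩, fun k hk => ⟨?_, hall k hk⟩⟩
      rcases hd with ⟨rfl, rfl⟩ | ⟨rfl, rfl⟩ | ⟨rfl, rfl⟩ | ⟨rfl, rfl⟩ <;>
        simp only [mul_zero, mul_one, mul_neg_one, add_zero, sub_zero] at * <;> omega
    · rintro ⟨⟨_, hp⟩, ⟨_, he⟩, hcells⟩
      exact ⟨⟨hp, he⟩, fun k hk => (hcells k hk).2⟩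
  · rw [if_neg hb]
    refine iff_of_false (by simp) ?_
    rintro ⟨⟨c1, _⟩, ⟨c2, _⟩, _⟩
    exact hb ⟨c1.1, c1.2.1, c1.2.2.1, c1.2.2.2, c2.1, c2.2.1, c2.2.2.1, c2.2.2.2⟩

lemma a_exists_iff (board : List (List String)) (col : String) (hcol : col ≠ " ") :
    (∃ i ∈ List.range board.length, ∃ j ∈ List.range board.length,
        ((pvDetectRow board col (i : Int) (j : Int) 5 0 1).1 > 0 ∨ (pvDetectRow board col (i : Int) (j : Int) 5 1 0).1 > 0 ∨
         (pvDetectRow board col (i : Int) (j : Int) 5 1 1).1 > 0 ∨ (pvDetectRow board col (i : Int) (j : Int) 5 1 (-1)).1 > 0)) ↔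
      HasOpen board col := by
  constructor
  · rintro ⟨i, hi, j, hj, hc⟩
    rw [List.mem_range] at hi hj
    rcases hc with h | h | h | h
    · obtain ⟨t, hw⟩ := (pvDetectRow_pos_iff board col hcol 0 1 (Or.inl ⟨rfl, rfl⟩) i j hj).1 h
      exact ⟨0, 1, Or.inl ⟨rfl, rfl⟩, _, _, hw⟩
    · obtain ⟨t, hw⟩ :=
        (pvDetectRow_pos_iff board col hcol 1 0 (Or.inr (Or.inl ⟨rfl, rfl⟩)) i j hj).1 h
      exact ⟨1, 0, Or.inr (Or.inl ⟨rfl, rfl⟩), _, _, hw⟩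
    · obtain ⟨t, hw⟩ :=
        (pvDetectRow_pos_iff board col hcol 1 1 (Or.inr (Or.inr (Or.inl ⟨rfl, rfl⟩))) i j hj).1 h
      exact ⟨1, 1, Or.inr (Or.inr (Or.inl ⟨rfl, rfl⟩)), _, _, hw⟩
    · obtain ⟨t, hw⟩ := (pvDetectRow_pos_iff board col hcol 1 (-1)
        (Or.inr (Or.inr (Or.inr ⟨rfl, rfl⟩))) i j hj).1 h
      exact ⟨1, -1, Or.inr (Or.inr (Or.inr ⟨rfl, rfl⟩)), _, _, hw⟩
  · rintro ⟨dy, dx, hd, y, x, hw⟩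
    have h0 := (hw.2.2 0 (by omega)).1
    simp only [Nat.cast_zero, zero_mul, add_zero] at h0
    refine ⟨y.toNat, by rw [List.mem_range]; omega, x.toNat, by rw [List.mem_range]; omega, ?_⟩
    have hjlt : x.toNat < board.length := by omega
    have ey : ((y.toNat : Nat) : Int) = y := Int.toNat_of_nonneg h0.1
    have ex : ((x.toNat : Nat) : Int) = x := Int.toNat_of_nonneg h0.2.2.1
    rcases hd with ⟨rfl, rfl⟩ | ⟨rfl, rfl⟩ | ⟨rfl, rfl⟩ | ⟨rfl, rfl⟩
    · refine Or.inl ((pvDetectRow_pos_iff board col hcol 0 1 (Or.inl ⟨rfl, rfl⟩)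
        y.toNat x.toNat hjlt).2 ⟨0, ?_⟩)
      rw [ey, ex]; simpa using hw
    · refine Or.inr (Or.inl ((pvDetectRow_pos_iff board col hcol 1 0
        (Or.inr (Or.inl ⟨rfl, rfl⟩)) y.toNat x.toNat hjlt).2 ⟨0, ?_⟩))
      rw [ey, ex]; simpa using hw
    · refine Or.inr (Or.inr (Or.inl ((pvDetectRow_pos_iff board col hcol 1 1
        (Or.inr (Or.inr (Or.inl ⟨rfl, rfl⟩))) y.toNat x.toNat hjlt).2 ⟨0, ?_⟩)))
      rw [ey, ex]; simpa using hw
    · refine Or.inr (Or.inr (Or.inr ((pvDetectRow_pos_iff board col hcol 1 (-1)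
        (Or.inr (Or.inr (Or.inr ⟨rfl, rfl⟩))) y.toNat x.toNat hjlt).2 ⟨0, ?_⟩)))
      rw [ey, ex]; simpa using hw

lemma b_exists_iff (board : List (List String)) (col : String) :
    (∃ y ∈ List.range board.length, ∃ x ∈ List.range board.length,
        (([(0, 1), (1, 0), (1, 1), (1, -1)] : List (Int × Int)).any
          (fun d => pvOpenAt board col (y : Int) (x : Int) d.1 d.2)) = true) ↔
      HasOpen board col := by
  constructor
  · rintro ⟨y, hy, x, hx, hany⟩
    rw [List.any_eq_true] at hany
    obtain ⟨d, hdmem, hop⟩ := hany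
    have hd : Dir4 d.1 d.2 := by
      simp only [List.mem_cons, List.not_mem_nil, or_false] at hdmem
      rcases hdmem with rfl | rfl | rfl | rfl
      · exact Or.inl ⟨rfl, rfl⟩
      · exact Or.inr (Or.inl ⟨rfl, rfl⟩)
      · exact Or.inr (Or.inr (Or.inl ⟨rfl, rfl⟩))
      · exact Or.inr (Or.inr (Or.inr ⟨rfl, rfl⟩))
    exact ⟨d.1, d.2, hd, y, x, (pvOpenAt_iff board col d.1 d.2 hd y x).1 hop⟩
  · rintro ⟨dy, dx, hd, y, x, hw⟩
    have h0 := (hw.2.2 0 (by omega)).1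
    simp only [Nat.cast_zero, zero_mul, add_zero] at h0
    refine ⟨y.toNat, by rw [List.mem_range]; omega, x.toNat, by rw [List.mem_range]; omega, ?_⟩
    rw [List.any_eq_true]
    refine ⟨(dy, dx), ?_, ?_⟩
    · rcases hd with ⟨rfl, rfl⟩ | ⟨rfl, rfl⟩ | ⟨rfl, rfl⟩ | ⟨rfl, rfl⟩ <;> simp
    · rw [Int.toNat_of_nonneg h0.1, Int.toNat_of_nonneg h0.2.2.1]
      exact (pvOpenAt_iff board col dy dx hd y x).2 hw

lemma a_inner (board : List (List String)) (col : String) :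
    ((List.range board.length).findSome? (fun i : Nat =>
      (List.range board.length).findSome? (fun j : Nat =>
        if (pvDetectRow board col (i : Int) (j : Int) 5 0 1).1 > 0 then some (PySem.Str.upper col ++ " won")
        else if (pvDetectRow board col (i : Int) (j : Int) 5 1 0).1 > 0 then some (PySem.Str.upper col ++ " won")
        else if (pvDetectRow board col (i : Int) (j : Int) 5 1 1).1 > 0 then some (PySem.Str.upper col ++ " won")
        else if (pvDetectRow board col (i : Int) (j : Int) 5 1 (-1)).1 > 0 then some (PySem.Str.upper col ++ " won")
        else none))) =
    if ∃ i ∈ List.range board.length, ∃ j ∈ List.range board.length,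
        ((pvDetectRow board col (i : Int) (j : Int) 5 0 1).1 > 0 ∨ (pvDetectRow board col (i : Int) (j : Int) 5 1 0).1 > 0 ∨
         (pvDetectRow board col (i : Int) (j : Int) 5 1 1).1 > 0 ∨ (pvDetectRow board col (i : Int) (j : Int) 5 1 (-1)).1 > 0)
      then some (PySem.Str.upper col ++ " won") else none := by
  have h1 : ∀ i : Nat, ((List.range board.length).findSome? (fun j : Nat =>
      if (pvDetectRow board col (i : Int) (j : Int) 5 0 1).1 > 0 then some (PySem.Str.upper col ++ " won")
      else if (pvDetectRow board col (i : Int) (j : Int) 5 1 0).1 > 0 then some (PySem.Str.upper col ++ " won")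
      else if (pvDetectRow board col (i : Int) (j : Int) 5 1 1).1 > 0 then some (PySem.Str.upper col ++ " won")
      else if (pvDetectRow board col (i : Int) (j : Int) 5 1 (-1)).1 > 0 then some (PySem.Str.upper col ++ " won")
      else none)) =
      if ∃ j ∈ List.range board.length,
          ((pvDetectRow board col (i : Int) (j : Int) 5 0 1).1 > 0 ∨ (pvDetectRow board col (i : Int) (j : Int) 5 1 0).1 > 0 ∨
           (pvDetectRow board col (i : Int) (j : Int) 5 1 1).1 > 0 ∨ (pvDetectRow board col (i : Int) (j : Int) 5 1 (-1)).1 > 0)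
        then some (PySem.Str.upper col ++ " won") else none := by
    intro i
    rw [show (fun j : Nat =>
        if (pvDetectRow board col (i : Int) (j : Int) 5 0 1).1 > 0 then some (PySem.Str.upper col ++ " won")
        else if (pvDetectRow board col (i : Int) (j : Int) 5 1 0).1 > 0 then some (PySem.Str.upper col ++ " won")
        else if (pvDetectRow board col (i : Int) (j : Int) 5 1 1).1 > 0 then some (PySem.Str.upper col ++ " won")
        else if (pvDetectRow board col (i : Int) (j : Int) 5 1 (-1)).1 > 0 then some (PySem.Str.upper col ++ " won")
        else none) = fun j : Nat =>
        if ((pvDetectRow board col (i : Int) (j : Int) 5 0 1).1 > 0 ∨ (pvDetectRow board col (i : Int) (j : Int) 5 1 0).1 > 0 ∨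
            (pvDetectRow board col (i : Int) (j : Int) 5 1 1).1 > 0 ∨ (pvDetectRow board col (i : Int) (j : Int) 5 1 (-1)).1 > 0)
          then some (PySem.Str.upper col ++ " won") else none from
      funext fun j => by split_ifs <;> first | rfl | tauto]
    exact findSome?_ite_const _ _ _
  rw [funext h1, findSome?_ite_const]

lemma b_inner (board : List (List String)) (col : String) :
    ((List.range board.length).findSome? (fun y : Nat =>
      (List.range board.length).findSome? (fun x : Nat =>
        if ([(0, 1), (1, 0), (1, 1), (1, -1)] : List (Int × Int)).any
            (fun d => pvOpenAt board col (y : Int) (x : Int) d.1 d.2) then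
          some (PySem.Str.upper col ++ " won")
        else none))) =
    if ∃ y ∈ List.range board.length, ∃ x ∈ List.range board.length,
        (([(0, 1), (1, 0), (1, 1), (1, -1)] : List (Int × Int)).any
          (fun d => pvOpenAt board col (y : Int) (x : Int) d.1 d.2)) = true
      then some (PySem.Str.upper col ++ " won") else none := by
  have h1 : ∀ y : Nat, ((List.range board.length).findSome? (fun x : Nat =>
      if ([(0, 1), (1, 0), (1, 1), (1, -1)] : List (Int × Int)).any
          (fun d => pvOpenAt board col (y : Int) (x : Int) d.1 d.2) then
        some (PySem.Str.upper col ++ " won")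
      else none)) =
      if ∃ x ∈ List.range board.length,
          (([(0, 1), (1, 0), (1, 1), (1, -1)] : List (Int × Int)).any
            (fun d => pvOpenAt board col (y : Int) (x : Int) d.1 d.2)) = true
        then some (PySem.Str.upper col ++ " won") else none := by
    intro y
    exact findSome?_ite_const _ _ _
  rw [funext h1, findSome?_ite_const]

lemma draw_iff (board : List (List String))
    (hpre : ∀ r ∈ board, r.length = (board.headD []).length) :
    ((List.range board.length).all (fun i : Nat =>
        (List.range (board.headD []).length).all (fun j : Nat => decide (pvCell board (i : Int) (j : Int) ≠ " ")))) =
      !(board.any (fun row => row.contains " ")) := by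
  rw [Bool.eq_iff_iff]
  simp only [List.all_eq_true, List.mem_range, decide_eq_true_eq, Bool.not_eq_true',
    List.any_eq_false]
  constructor
  · intro h row hrow
    obtain ⟨i, hi, rfl⟩ := List.mem_iff_getElem.1 hrow
    intro hc
    have hmem : " " ∈ board[i] := by
      rw [← List.contains_iff_mem]; exact hc
    obtain ⟨j, hj, hcell⟩ := List.mem_iff_getElem.1 hmem
    have hlen : board[i].length = (board.headD []).length := hpre _ hrow
    have hthis := h i hi j (by omega)
    exact hthis ((pvCell_eq board i j hi hj).trans hcell)
  · intro h i hi j hj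
    have hrow : board[i] ∈ board := List.getElem_mem hi
    have hlen := hpre _ hrow
    rw [pvCell_eq board i j hi (by omega)]
    intro hsp
    have hco := h board[i] hrow
    exact hco (by rw [List.contains_iff_mem]; exact List.mem_iff_getElem.2 ⟨j, by omega, hsp⟩)

-- ===== VERDICT (by name: the statement is the Claim_ definition above) =====
theorem is_win_spec : Claim_equal_is_win := by
  intro board hdom hpre
  unfold Spec_is_win is_win is_win_alt
  simp only [a_inner, b_inner, List.findSome?_cons, List.findSome?_nil]
  by_cases Hb : HasOpen board "b"
  · have h1 := (a_exists_iff board "b" (by decide)).2 Hb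
    have h2 := (b_exists_iff board "b").2 Hb
    rw [if_pos h1, if_pos h2]
    rfl
  · have h1 : ¬ _ := fun h => Hb ((a_exists_iff board "b" (by decide)).1 h)
    have h2 : ¬ _ := fun h => Hb ((b_exists_iff board "b").1 h)
    rw [if_neg h1, if_neg h2]
    by_cases Hw : HasOpen board "w"
    · have h3 := (a_exists_iff board "w" (by decide)).2 Hw
      have h4 := (b_exists_iff board "w").2 Hw
      rw [if_pos h3, if_pos h4]
      rfl
    · have h3 : ¬ _ := fun h => Hw ((a_exists_iff board "w" (by decide)).1 h)
      have h4 : ¬ _ := fun h => Hw ((b_exists_iff board "w").1 h)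
      rw [if_neg h3, if_neg h4]
      rw [draw_iff board hpre.1]
      cases hA : board.any (fun row => row.contains " ") <;> simp
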